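-- pv_equiv track=rewrite | github.com/StarsMmd/Blender-Addon-Gamecube-Models | shared/Constants/RecursiveTypes.py | getSubType
-- ===== SOURCE A (Python) =====
-- def isBracketedType(field_type):
-- 	return field_type[0:1] == "(" and field_type[-1:] == ")"
--
-- def isPointerType(field_type):
-- 	return field_type[0:1] == "*"
--
-- def isUnboundedArrayType(field_type):
-- 	return (not isPointerType(field_type)) and field_type[-2:] == "[]"
--
-- def isBoundedArrayType(field_type):
-- 	return (not isPointerType(field_type)) and "[" in field_type and  field_type[-1:] == "]"
--
-- def isArrayType(field_type):
-- 	return isUnboundedArrayType(field_type) or isBoundedArrayType(field_type)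
--
-- def getBracketedSubType(field_type):
-- 	sub_type = field_type
-- 	while isBracketedType(sub_type):
-- 		sub_type = sub_type[1:-1]
-- 	return sub_type
--
-- def getPointerSubType(field_type):
-- 	sub_type = field_type[1:]
-- 	return getBracketedSubType(sub_type)
--
-- def getArraySubType(field_type):
-- 	sub_type = field_type
-- 	last = field_type[-1:]
-- 	if last == "]":
-- 		while last != "[":
-- 			last = sub_type[-1:]
-- 			sub_type = sub_type[0:-1]
--
-- 	return getBracketedSubType(sub_type)
--
-- def getSubType(field_type):
-- 	sub_type = field_type
-- 	if isBracketedType(sub_type):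
-- 		sub_type = getBracketedSubType(sub_type)
-- 		return getSubType(sub_type)
-- 	if isArrayType(sub_type):
-- 		sub_type = getArraySubType(sub_type)
-- 		return getSubType(sub_type)
-- 	if isPointerType(sub_type):
-- 		sub_type = getPointerSubType(sub_type)
-- 		return getSubType(sub_type)
--
-- 	return sub_type
-- ===== SOURCE B (Python) =====
-- def getSubType(field_type):
--     # Iterative one-layer stripper: no helper functions, rindex for array suffixes.
--     s = field_type
--     while True:
--         if s[:1] == "(" and s[-1:] == ")":
--             s = s[1:-1]
--         elif s[:1] != "*" and s[-1:] == "]" and "[" in s: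
--             s = s[:s.rindex("[")]
--         elif s[:1] == "*":
--             s = s[1:]
--         else:
--             return s
-- ===== Notes on version B (the rewrite author's own statement) =====
-- stated objective: simpler
-- what changed: Replaced the six mutually-calling helper functions and tail recursion by a single iterative while-loop that strips one decoration layer per step, using str.rindex instead of the char-by-char chopping loop for array suffixes.
import Mathlib
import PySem

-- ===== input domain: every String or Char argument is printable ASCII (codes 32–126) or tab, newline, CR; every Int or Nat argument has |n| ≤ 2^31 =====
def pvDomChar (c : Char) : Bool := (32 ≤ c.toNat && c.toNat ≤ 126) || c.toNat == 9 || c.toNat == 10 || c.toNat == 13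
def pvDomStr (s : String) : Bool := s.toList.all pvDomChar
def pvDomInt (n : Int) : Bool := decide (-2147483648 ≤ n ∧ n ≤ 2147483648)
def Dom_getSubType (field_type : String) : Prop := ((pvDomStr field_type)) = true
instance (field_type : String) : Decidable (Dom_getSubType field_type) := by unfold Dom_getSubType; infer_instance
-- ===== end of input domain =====

-- B replaces A's six mutually-calling helpers and tail recursion by a single iterative
-- one-layer-per-step stripping loop (objective: simpler); return values agree everywhere.

-- ===== PORT A =====
-- Ports work on List Char; `s[0:1] == "("` is `l.head? == some '('`, `s[-1:] == ")"` is
-- `l.getLast? == some ')'` (a length-≤1 slice compared to a 1-char string), exact on all inputs.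

def isBracketedA (l : List Char) : Bool :=
  (l.head? == some '(') && (l.getLast? == some ')')

def isPointerA (l : List Char) : Bool :=
  l.head? == some '*'

def isUnboundedArrayA (l : List Char) : Bool :=
  !isPointerA l && (PySem.List.slice l (some (-2)) none == ['[', ']'])

def isBoundedArrayA (l : List Char) : Bool :=
  !isPointerA l && PySem.Chars.isIn ['['] l && (l.getLast? == some ']')

def isArrayA (l : List Char) : Bool :=
  isUnboundedArrayA l || isBoundedArrayA l

def bracketStripA (l : List Char) : List Char :=
  if isBracketedA l then bracketStripA ((l.drop 1).dropLast) else l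
termination_by l.length
decreasing_by
  have hne : l ≠ [] := by
    intro h; subst h; simp [isBracketedA] at *
  have : 1 ≤ l.length := List.length_pos_of_ne_nil hne
  simp [List.length_dropLast]; omega

def pointerSubA (l : List Char) : List Char :=
  bracketStripA (l.drop 1)

-- Python's inner while-loop of getArraySubType; `last` is `sub[-1:]` as Option Char (none = "").
-- On an input with no '[' Python's loop never terminates once sub is empty; that state is
-- unreachable from getSubType (only called when isArrayType holds), the port returns [] there.
def chopLoopA (sub : List Char) (last : Option Char) : List Char :=
  if last == some '[' then sub
  else
    match sub with
    | [] => []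
    | x :: xs => chopLoopA (x :: xs).dropLast (x :: xs).getLast?
termination_by sub.length
decreasing_by simp

theorem chopLoopA_stop (sub : List Char) : chopLoopA sub (some '[') = sub := by
  rw [chopLoopA.eq_def]; simp

theorem chopLoopA_step (sub : List Char) (hne : sub ≠ []) (last : Option Char)
    (h : last ≠ some '[') : chopLoopA sub last = chopLoopA sub.dropLast sub.getLast? := by
  cases sub with
  | nil => exact absurd rfl hne
  | cons a as => rw [chopLoopA.eq_def]; simp [h]

def arraySubA (l : List Char) : List Char :=
  let last := l.getLast?
  let sub := if last == some ']' then chopLoopA l last else l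
  bracketStripA sub

theorem len_bracketStripA (l : List Char) : (bracketStripA l).length ≤ l.length := by
  rw [bracketStripA]
  split
  · have := len_bracketStripA ((l.drop 1).dropLast)
    simp [List.length_dropLast] at this ⊢
    omega
  · exact le_rfl
termination_by l.length
decreasing_by
  rename_i h
  have hne : l ≠ [] := by intro hn; subst hn; simp [isBracketedA] at h
  have : 1 ≤ l.length := List.length_pos_of_ne_nil hne
  simp [List.length_dropLast]; omega

theorem len_chopLoopA (sub : List Char) (last : Option Char) :
    (chopLoopA sub last).length ≤ sub.length := by
  by_cases h : last = some '['
  · subst h; rw [chopLoopA_stop]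
  · cases sub with
    | nil =>
      have : chopLoopA ([] : List Char) last = [] := by
        rw [chopLoopA.eq_def]; simp [h]
      simp [this]
    | cons a as =>
      rw [chopLoopA_step (a :: as) (by simp) last h]
      have := len_chopLoopA (a :: as).dropLast (a :: as).getLast?
      simp at this ⊢
      omega
termination_by sub.length
decreasing_by simp

theorem isArrayA_last (l : List Char) (h : isArrayA l = true) :
    l.getLast? = some ']' := by
  simp [isArrayA, isUnboundedArrayA, isBoundedArrayA] at h
  cases h with
  | inl h' =>
    have h := h'.2
    rw [PySem.List.slice_from_neg_ofNat l 2 (by omega)] at h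
    calc l.getLast? = (l.take (l.length - 2) ++ l.drop (l.length - 2)).getLast? := by
          rw [List.take_append_drop]
      _ = (l.drop (l.length - 2)).getLast? := List.getLast?_append_of_ne_nil _ (by rw [h]; simp)
      _ = some ']' := by rw [h]; decide
  | inr h' => exact h'.2

theorem arraySubA_eq (l : List Char) (hl : l.getLast? = some ']') :
    arraySubA l = bracketStripA (chopLoopA l (some ']')) := by
  unfold arraySubA
  rw [hl]
  simp

def getSubTypeCore (l : List Char) : List Char :=
  if isBracketedA l then getSubTypeCore (bracketStripA l)
  else if isArrayA l then getSubTypeCore (arraySubA l)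
  else if isPointerA l then getSubTypeCore (pointerSubA l)
  else l
termination_by l.length
decreasing_by
  · rename_i h
    have hne : l ≠ [] := by intro hn; subst hn; simp [isBracketedA] at h
    have h1 : 1 ≤ l.length := List.length_pos_of_ne_nil hne
    rw [bracketStripA, if_pos h]
    have := len_bracketStripA ((l.drop 1).dropLast)
    simp [List.length_dropLast] at this ⊢
    omega
  · rename_i h1 h2
    have hl : l.getLast? = some ']' := isArrayA_last l h2
    have hne : l ≠ [] := by intro hn; subst hn; simp at hl
    have h1 : 1 ≤ l.length := List.length_pos_of_ne_nil hne
    show (arraySubA l).length < l.length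
    rw [arraySubA_eq l hl]
    have hb := len_bracketStripA (chopLoopA l (some ']'))
    have hc : (chopLoopA l (some ']')).length < l.length := by
      rw [chopLoopA_step l hne (some ']') (by simp)]
      have := len_chopLoopA l.dropLast l.getLast?
      have hd : l.dropLast.length = l.length - 1 := by simp
      omega
    omega
  · rename_i h1 h2 h3
    have hne : l ≠ [] := by intro hn; subst hn; simp [isPointerA] at h3
    have : 1 ≤ l.length := List.length_pos_of_ne_nil hne
    simp [pointerSubA]
    have := len_bracketStripA (l.drop 1)
    simp at this
    omega

def getSubType (field_type : String) : String :=
  String.ofList (getSubTypeCore field_type.toList)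

-- ===== PORT B =====

-- s[:s.rindex("[")] : everything before the last '['.
def rchopB (l : List Char) : List Char :=
  ((l.reverse.dropWhile (· != '[')).drop 1).reverse

theorem len_rchopB (l : List Char) (h : '[' ∈ l) : (rchopB l).length < l.length := by
  have hne : l.reverse.dropWhile (· != '[') ≠ [] := by
    intro hn
    rw [List.dropWhile_eq_nil_iff] at hn
    have := hn '[' (by simpa using h)
    simp at this
  have h1 : (l.reverse.dropWhile (· != '[')).length ≤ l.length := by
    have := List.length_dropWhile_le (p := (· != '[')) l.reverse
    simpa using this
  have h2 : 1 ≤ (l.reverse.dropWhile (· != '[')).length := List.length_pos_of_ne_nil hne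
  simp [rchopB]
  omega

def getSubTypeAltCore (l : List Char) : List Char :=
  if (l.head? == some '(') && (l.getLast? == some ')') then
    getSubTypeAltCore ((l.drop 1).dropLast)
  else if !(l.head? == some '*') && (l.getLast? == some ']') && PySem.Chars.isIn ['['] l then
    getSubTypeAltCore (rchopB l)
  else if l.head? == some '*' then
    getSubTypeAltCore (l.drop 1)
  else l
termination_by l.length
decreasing_by
  · rename_i h
    have hne : l ≠ [] := by intro hn; subst hn; simp at h
    have : 1 ≤ l.length := List.length_pos_of_ne_nil hne
    simp [List.length_dropLast]; omega
  · rename_i h1 h2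
    have hmem : '[' ∈ l := by
      simp [PySem.Chars.isIn_iff_infix, List.singleton_infix_iff] at h2
      tauto
    exact len_rchopB l hmem
  · rename_i h1 h2 h3
    have hne : l ≠ [] := by intro hn; subst hn; simp at h3
    have : 1 ≤ l.length := List.length_pos_of_ne_nil hne
    simp; omega

def getSubType_alt (field_type : String) : String :=
  String.ofList (getSubTypeAltCore field_type.toList)

-- ===== PRECONDITION & SPEC =====
def Spec_getSubType (field_type : String) (out : String) : Prop := out = getSubType_alt field_type
instance (field_type : String) (out : String) : Decidable (Spec_getSubType field_type out) := by unfold Spec_getSubType; infer_instance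

-- ===== CLAIM (what is proved, stated in full; the proofs are below) =====
def Claim_equal_getSubType : Prop := ∀ (field_type : String), Dom_getSubType field_type → Spec_getSubType field_type (getSubType field_type)

-- ===== LEMMAS AND PROOFS =====

-- A's getSubType absorbs a full outer-paren strip.
theorem core_bracketStrip (l : List Char) :
    getSubTypeCore (bracketStripA l) = getSubTypeCore l := by
  by_cases h : isBracketedA l = true
  · conv_rhs => rw [getSubTypeCore]
    rw [if_pos h]
  · rw [bracketStripA, if_neg h]

-- the chopping loop computes "everything before the last '['"
theorem chopLoopA_eq_rchopB (sub : List Char) (h : '[' ∈ sub) (last : Option Char)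
    (hl : last ≠ some '[') : chopLoopA sub last = rchopB sub := by
  rcases List.eq_nil_or_concat sub with rfl | ⟨ys, x, rfl⟩
  · simp at h
  · rw [List.concat_eq_append] at h ⊢
    rw [chopLoopA_step (ys ++ [x]) (by simp) last hl]
    by_cases hx : x = '['
    · subst hx
      have : chopLoopA (ys ++ ['[']).dropLast (ys ++ ['[']).getLast? = ys := by
        simp [chopLoopA_stop]
      rw [this]
      simp [rchopB]
    · have hmem : '[' ∈ ys := by
        rcases List.mem_append.mp h with h' | h'
        · exact h'
        · simp at h'; exact absurd h'.symm hx
      have hrec : chopLoopA (ys ++ [x]).dropLast (ys ++ [x]).getLast? = rchopB ys := by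
        simp only [List.dropLast_concat, List.getLast?_concat]
        exact chopLoopA_eq_rchopB ys hmem (some x) (by simpa using hx)
      rw [hrec]
      simp [rchopB, hx]
termination_by sub.length
decreasing_by subst_vars; simp [List.concat_eq_append]

-- A's three conditions, in B's form
theorem isArrayA_iff (l : List Char) :
    isArrayA l = (!(l.head? == some '*') && (l.getLast? == some ']') && PySem.Chars.isIn ['['] l) := by
  by_cases h : isArrayA l = true
  · rw [h]
    have hlast := isArrayA_last l h
    simp [isArrayA, isUnboundedArrayA, isBoundedArrayA] at h
    have hmem : '[' ∈ l := by
      cases h with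
      | inl h' =>
        have h2 := h'.2
        rw [PySem.List.slice_from_neg_ofNat l 2 (by omega)] at h2
        have : '[' ∈ l.drop (l.length - 2) := by rw [h2]; simp
        exact List.mem_of_mem_drop this
      | inr h' =>
        have h2 := h'.1.2
        simp [PySem.Chars.isIn_iff_infix, List.singleton_infix_iff] at h2
        tauto
    have hp : l.head? ≠ some '*' := by
      cases h with
      | inl h' => simpa [isPointerA] using h'.1
      | inr h' => simpa [isPointerA] using h'.1.1
    simp [hlast, hp, PySem.Chars.isIn_iff_infix, List.singleton_infix_iff, hmem]
  · rw [Bool.eq_false_iff.mpr h]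
    by_cases hm : '[' ∈ l
    · by_cases hp : l.head? = some '*'
      · simp [hp]
      · by_cases hlast : l.getLast? = some ']'
        · exfalso
          apply h
          simp [isArrayA, isBoundedArrayA, isPointerA, hp, hlast,
            PySem.Chars.isIn_iff_infix, List.singleton_infix_iff, hm]
        · simp [hlast]
    · have hIn : PySem.Chars.isIn ['['] l = false := by
        simp [PySem.Chars.isIn_eq_false_iff, List.singleton_infix_iff, hm]
      simp [hIn]

theorem coreEq (n : Nat) : ∀ l : List Char, l.length ≤ n → getSubTypeCore l = getSubTypeAltCore l := by
  induction n with
  | zero =>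
    intro l hlen
    have : l = [] := List.eq_nil_of_length_eq_zero (by omega)
    subst this
    rw [getSubTypeCore, getSubTypeAltCore]
    simp [isBracketedA, isArrayA, isUnboundedArrayA, isBoundedArrayA, isPointerA,
      PySem.List.slice, PySem.Chars.isIn]
  | succ n ih =>
    intro l hlen
    rw [getSubTypeCore, getSubTypeAltCore]
    by_cases hb : isBracketedA l = true
    · have hb' : (l.head? == some '(' && l.getLast? == some ')') = true := by
        simpa [isBracketedA] using hb
      rw [if_pos hb, if_pos hb']
      have hne : l ≠ [] := by intro hn; subst hn; simp [isBracketedA] at hb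
      have h1 : 1 ≤ l.length := List.length_pos_of_ne_nil hne
      have hstep : getSubTypeCore (bracketStripA l)
          = getSubTypeCore (bracketStripA ((l.drop 1).dropLast)) := by
        conv_lhs => rw [bracketStripA]
        rw [if_pos hb]
      rw [hstep, core_bracketStrip ((l.drop 1).dropLast)]
      apply ih
      simp [List.length_dropLast]
      omega
    · have hb' : ¬ (l.head? == some '(' && l.getLast? == some ')') = true := by
        simpa [isBracketedA] using hb
      rw [if_neg hb, if_neg hb', ← isArrayA_iff]
      by_cases ha : isArrayA l = true
      · rw [if_pos ha, if_pos ha]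
        have hlast := isArrayA_last l ha
        have hne : l ≠ [] := by intro hn; subst hn; simp at hlast
        have hmem : '[' ∈ l := by
          have hiff := isArrayA_iff l
          rw [ha] at hiff
          have h2 := hiff.symm
          simp [PySem.Chars.isIn_iff_infix, List.singleton_infix_iff] at h2
          tauto
        have hchop : arraySubA l = bracketStripA (rchopB l) := by
          rw [arraySubA_eq l hlast, chopLoopA_eq_rchopB l hmem (some ']') (by simp)]
        rw [hchop, core_bracketStrip (rchopB l)]
        apply ih
        have := len_rchopB l hmem
        omega
      · rw [if_neg ha, if_neg ha]
        by_cases hp : isPointerA l = true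
        · have hp' : (l.head? == some '*') = true := by simpa [isPointerA] using hp
          rw [if_pos hp, if_pos hp']
          have hne : l ≠ [] := by intro hn; subst hn; simp [isPointerA] at hp
          have h1 : 1 ≤ l.length := List.length_pos_of_ne_nil hne
          unfold pointerSubA
          rw [core_bracketStrip (l.drop 1)]
          apply ih
          simp
          omega
        · have hp' : ¬ (l.head? == some '*') = true := by simpa [isPointerA] using hp
          rw [if_neg hp, if_neg hp']

-- ===== VERDICT (by name: the statement is the Claim_ definition above) =====
theorem getSubType_spec : Claim_equal_getSubType := by
  intro s _
  unfold Spec_getSubType getSubType getSubType_alt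
  rw [coreEq s.toList.length s.toList le_rfl]
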